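-- pv_equiv track=rewrite | github.com/Murat65536/Vision | contour.py | biggestContourI
-- ===== SOURCE A (Python) =====
-- def biggestContourI(contours):
--     maxVal = 0
--     maxI = None
--     for i in range(0, len(contours)):
--         if len(contours[i]) > maxVal:
--             cs = contours[i]
--             maxVal = len(contours[i])
--             maxI = i
--     return maxI
-- ===== SOURCE B (Python) =====
-- def biggestContourI(contours):
--     lengths = [len(c) for c in contours]
--     m = max(lengths, default=0)
--     return lengths.index(m) if m > 0 else None
-- ===== Notes on version B (the rewrite author's own statement) =====
-- stated objective: alternative
-- what changed: Replaced the fused single-loop argmax (tracking maxVal/maxI while iterating indices) with a three-step decomposition: build a lengths table, take max(lengths, default=0), then locate its first position with lengths.index, returning None when the max is 0.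
import Mathlib
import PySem

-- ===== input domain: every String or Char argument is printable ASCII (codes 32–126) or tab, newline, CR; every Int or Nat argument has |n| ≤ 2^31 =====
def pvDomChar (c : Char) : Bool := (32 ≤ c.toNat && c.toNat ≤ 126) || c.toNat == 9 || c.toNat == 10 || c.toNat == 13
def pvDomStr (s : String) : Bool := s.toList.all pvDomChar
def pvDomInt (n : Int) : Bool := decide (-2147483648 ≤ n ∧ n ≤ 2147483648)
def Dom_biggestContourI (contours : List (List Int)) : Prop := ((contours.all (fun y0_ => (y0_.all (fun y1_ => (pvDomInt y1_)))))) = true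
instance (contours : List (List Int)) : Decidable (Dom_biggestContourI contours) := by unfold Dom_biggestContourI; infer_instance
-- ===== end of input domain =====

-- B replaces A's fused argmax loop by a build-lengths-table, max-with-default, then first-index search decomposition (alternative, same cost).


-- ===== PORT A =====
-- for i in range(0, len(contours)): if len(contours[i]) > maxVal: update (maxVal, maxI)
def biggestContourI (contours : List (List Int)) : Option Int :=
  ((PySem.List.pyRange 0 (contours.length : Int) 1).foldl
    (fun (st : Int × Option Int) i =>
      if ((PySem.List.pyGetD contours i []).length : Int) > st.1 then
        (((PySem.List.pyGetD contours i []).length : Int), some i)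
      else st)
    (0, none)).2

-- ===== PORT B =====
-- lengths table, max(lengths, default=0), then lengths.index(m) if m > 0 else None
def biggestContourI_alt (contours : List (List Int)) : Option Int :=
  let lengths : List Int := contours.map (fun c => (c.length : Int))
  let m : Int := (PySem.List.max? lengths (fun x => x)).getD 0
  if m > 0 then (PySem.List.index? lengths m).map (fun k => (k : Int)) else none

-- ===== PRECONDITION & SPEC =====
def Spec_biggestContourI (contours : List (List Int)) (out : Option Int) : Prop := out = biggestContourI_alt contours
instance (contours : List (List Int)) (out : Option Int) : Decidable (Spec_biggestContourI contours out) := by unfold Spec_biggestContourI; infer_instance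

-- ===== CLAIM (what is proved, stated in full; the proofs are below) =====
def Claim_equal_biggestContourI : Prop := ∀ (contours : List (List Int)), Dom_biggestContourI contours → Spec_biggestContourI contours (biggestContourI contours)

-- ===== LEMMAS AND PROOFS =====

-- the lengths table and its running maximum
def pvLens (contours : List (List Int)) : List Int := contours.map (fun c => (c.length : Int))
def pvMx (contours : List (List Int)) : Int := (pvLens contours).foldl max 0

lemma pvLens_nonneg (contours : List (List Int)) : ∀ x ∈ pvLens contours, 0 ≤ x := by
  intro x hx
  simp only [pvLens, List.mem_map] at hx
  obtain ⟨c, _, rfl⟩ := hx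
  exact Int.natCast_nonneg _

lemma pvMx_nonneg (contours : List (List Int)) : 0 ≤ pvMx contours :=
  (PySem.List.le_foldl_max (pvLens contours) 0).1

lemma alt_eq (contours : List (List Int)) :
    biggestContourI_alt contours =
      if 0 < pvMx contours then (PySem.List.index? (pvLens contours) (pvMx contours)).map (fun k => (k : Int)) else none := by
  unfold biggestContourI_alt pvMx pvLens
  cases h : contours.map (fun c => (c.length : Int)) with
  | nil => simp [PySem.List.max?]
  | cons x t =>
    have hx : (0 : Int) ≤ x := by
      have := pvLens_nonneg contours
      simp only [pvLens, h] at this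
      exact this x (by simp)
    simp only [PySem.List.max?_id_cons, Option.getD_some, List.foldl_cons, max_eq_right hx]

-- A's loop over a prefix computes (running max of lengths, current argmax)
lemma loop_spec (contours : List (List Int)) :
    ((PySem.List.pyRange 0 (contours.length : Int) 1).foldl
      (fun (st : Int × Option Int) i =>
        if ((PySem.List.pyGetD contours i []).length : Int) > st.1 then
          (((PySem.List.pyGetD contours i []).length : Int), some i)
        else st)
      (0, none)) =
    (pvMx contours,
      if 0 < pvMx contours then (PySem.List.index? (pvLens contours) (pvMx contours)).map (fun k => (k : Int)) else none) := by
  induction contours using List.reverseRecOn with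
  | nil => simp [pvMx, pvLens, PySem.List.pyRange_one_eq_nil]
  | append_singleton xs y ih =>
    have hlen : ((xs ++ [y]).length : Int) = (xs.length : Int) + 1 := by
      simp
    have hsplit : PySem.List.pyRange 0 ((xs ++ [y]).length : Int) 1 =
        PySem.List.pyRange 0 (xs.length : Int) 1 ++ [(xs.length : Int)] := by
      rw [hlen, PySem.List.pyRange_one_succ_right (by positivity)]
    -- the fold over the prefix on the EXTENDED list equals the fold on xs:
    have hpfx : ∀ (st : Int × Option Int),
        (PySem.List.pyRange 0 (xs.length : Int) 1).foldl
          (fun (st : Int × Option Int) i =>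
            if ((PySem.List.pyGetD (xs ++ [y]) i []).length : Int) > st.1 then
              (((PySem.List.pyGetD (xs ++ [y]) i []).length : Int), some i)
            else st) st =
        (PySem.List.pyRange 0 (xs.length : Int) 1).foldl
          (fun (st : Int × Option Int) i =>
            if ((PySem.List.pyGetD xs i []).length : Int) > st.1 then
              (((PySem.List.pyGetD xs i []).length : Int), some i)
            else st) st := by
      intro st
      apply PySem.List.foldl_congr_mem
      intro st' i hi
      have hi' := (PySem.List.mem_pyRange_one).1 hi
      have hget : PySem.List.pyGetD (xs ++ [y]) i [] = PySem.List.pyGetD xs i [] := by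
        obtain ⟨k, hk, rfl⟩ : ∃ k : Nat, (k : Int) < (xs.length : Int) ∧ i = (k : Int) := by
          refine ⟨i.toNat, ?_, ?_⟩ <;> omega
        rw [PySem.List.pyGetD_natCast, PySem.List.pyGetD_natCast]
        have hk' : k < xs.length := by exact_mod_cast hk
        rw [List.getD_eq_getElem _ _ (by simpa using Nat.lt_succ_of_lt hk'), List.getD_eq_getElem _ _ hk']
        simp [List.getElem_append_left hk']
      rw [hget]
    have hlast : PySem.List.pyGetD (xs ++ [y]) ((xs.length : Nat) : Int) [] = y := by
      rw [PySem.List.pyGetD_natCast]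
      rw [List.getD_eq_getElem _ _ (by simp)]
      simp
    rw [hsplit, List.foldl_append, hpfx, ih]
    simp only [List.foldl_cons, List.foldl_nil, hlast]
    have hlens : pvLens (xs ++ [y]) = pvLens xs ++ [(y.length : Int)] := by
      simp [pvLens]
    have hmx : pvMx (xs ++ [y]) = max (pvMx xs) (y.length : Int) := by
      simp [pvMx, hlens]
    by_cases hgt : ((y.length : Int)) > pvMx xs
    · -- new maximum at the last position
      have hnotmem : (y.length : Int) ∉ pvLens xs := by
        intro hmem
        exact absurd ((PySem.List.le_foldl_max (pvLens xs) 0).2 _ hmem) (by simpa [pvMx] using hgt)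
      have hpos : 0 < (y.length : Int) := lt_of_le_of_lt (pvMx_nonneg xs) hgt
      simp only [if_pos hgt, hmx, max_eq_right (le_of_lt hgt), if_pos hpos, hlens]
      rw [PySem.List.index?_append_singleton_self _ _ hnotmem]
      simp [pvLens]
    · -- old state kept
      have hle : (y.length : Int) ≤ pvMx xs := not_lt.1 hgt
      simp only [if_neg hgt, hmx, max_eq_left hle, hlens]
      by_cases hpos : 0 < pvMx xs
      · have hmem : pvMx xs ∈ pvLens xs := by
          rcases PySem.List.foldl_max_mem (pvLens xs) 0 with h0 | h
          · exact absurd h0 (by unfold pvMx at hpos; omega)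
          · exact h
        rw [if_pos hpos, if_pos hpos, PySem.List.index?_append_of_mem _ hmem]
      · rw [if_neg hpos, if_neg hpos]

-- ===== VERDICT (by name: the statement is the Claim_ definition above) =====
theorem biggestContourI_spec : Claim_equal_biggestContourI := by
  intro contours _
  unfold Spec_biggestContourI biggestContourI
  rw [loop_spec, alt_eq]
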